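-- pv_equiv track=rewrite | github.com/ciccig/pythoncamp | exercise2.py | rovarsprak
-- ===== SOURCE A (Python) =====
-- def rovarsprak(inputstring):
--     vokaler = ["a","o","u","å", "e", "i", "y", "ä", "ö","A","O","U","Å", "E", "I", "Y", "Ä", "Ö"]
--     letters = list(inputstring)
--     rovarstring = ""
--     for i in letters:
--         if vokaler.count(i) > 0:
--             rovarstring += i
--         else:
--             rovarstring += i
--             rovarstring +="o"
--             rovarstring += i
--             #rovarstring = ''.join(rovarstring,i,"o",i)
--     return rovarstring
-- ===== SOURCE B (Python) =====
-- VOWELS = set("aouåeiyäöAOUÅEIYÄÖ")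
--
-- def rovarsprak(inputstring):
--     table = str.maketrans({c: c + "o" + c for c in inputstring if c not in VOWELS})
--     return inputstring.translate(table)
-- ===== Notes on version B (the rewrite author's own statement) =====
-- stated objective: idiomatic
-- what changed: Replaces the per-character accumulator loop with list.count membership tests by building a translation table (non-vowel char -> char+'o'+char) once and applying str.translate in a single pass.
import Mathlib
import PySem

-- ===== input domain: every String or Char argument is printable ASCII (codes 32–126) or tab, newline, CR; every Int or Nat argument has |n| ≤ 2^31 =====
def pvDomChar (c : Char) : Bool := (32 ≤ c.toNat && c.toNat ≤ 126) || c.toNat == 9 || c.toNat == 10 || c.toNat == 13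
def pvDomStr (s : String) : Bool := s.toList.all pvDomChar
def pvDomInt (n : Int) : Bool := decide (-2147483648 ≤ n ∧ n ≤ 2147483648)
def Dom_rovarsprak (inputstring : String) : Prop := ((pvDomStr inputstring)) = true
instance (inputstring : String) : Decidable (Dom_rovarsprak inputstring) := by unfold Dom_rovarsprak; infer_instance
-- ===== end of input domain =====

-- B replaces A's accumulator loop by a precomputed translation table applied in one map; equivalence is total.
-- ===== PORT A =====
-- strings are handled as List Char (PySem convention); '+=' on the accumulator is '++' on the char list
def rovarsprak (inputstring : String) : String :=
  let vokaler : List Char := ['a','o','u','å','e','i','y','ä','ö','A','O','U','Å','E','I','Y','Ä','Ö']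
  let letters : List Char := inputstring.toList
  let rovarstring : List Char :=
    letters.foldl (fun acc i =>
      if vokaler.count i > 0 then acc ++ [i]
      else ((acc ++ [i]) ++ ['o']) ++ [i]) []
  String.mk rovarstring

-- ===== PORT B =====
def pvVowelsB : List Char := ['a','o','u','å','e','i','y','ä','ö','A','O','U','Å','E','I','Y','Ä','Ö']

-- dict comprehension over the input's chars, then translate = one lookup per char
def rovarsprak_alt (inputstring : String) : String :=
  let table : PySem.Dict Char (List Char) :=
    inputstring.toList.foldl
      (fun d c => if pvVowelsB.contains c then d else PySem.Dict.insert d c [c, 'o', c])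
      PySem.Dict.empty
  String.mk ((inputstring.toList.map (fun c => PySem.Dict.getD table c [c])).flatten)

-- ===== PRECONDITION & SPEC =====
def Spec_rovarsprak (inputstring : String) (out : String) : Prop := out = rovarsprak_alt inputstring
instance (inputstring : String) (out : String) : Decidable (Spec_rovarsprak inputstring out) := by unfold Spec_rovarsprak; infer_instance

-- ===== CLAIM (what is proved, stated in full; the proofs are below) =====
def Claim_equal_rovarsprak : Prop := ∀ (inputstring : String), Dom_rovarsprak inputstring → Spec_rovarsprak inputstring (rovarsprak inputstring)

-- ===== LEMMAS AND PROOFS =====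

def pvExpand (c : Char) : List Char :=
  if pvVowelsB.contains c then [c] else [c, 'o', c]

theorem pvFoldA (l : List Char) (acc : List Char) :
    l.foldl (fun acc i =>
      if pvVowelsB.count i > 0 then acc ++ [i]
      else ((acc ++ [i]) ++ ['o']) ++ [i]) acc = acc ++ l.flatMap pvExpand := by
  induction l generalizing acc with
  | nil => simp
  | cons x l ih =>
    simp only [List.foldl_cons, ih, List.flatMap_cons, pvExpand]
    by_cases hx : x ∈ pvVowelsB
    · have h1 : pvVowelsB.count x > 0 := List.count_pos_iff.mpr hx
      simp [h1, hx]
    · have h1 : ¬ pvVowelsB.count x > 0 := by simpa [List.count_pos_iff] using hx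
      simp [h1, hx]

theorem pvTblGet (l : List Char) (c : Char) (d : PySem.Dict Char (List Char)) :
    PySem.Dict.get?
      (l.foldl (fun d c => if pvVowelsB.contains c then d
                           else PySem.Dict.insert d c [c, 'o', c]) d) c
    = if c ∈ l ∧ c ∉ pvVowelsB then some [c, 'o', c] else PySem.Dict.get? d c := by
  induction l generalizing d with
  | nil => simp
  | cons x l ih =>
    simp only [List.foldl_cons, ih]
    by_cases hx : pvVowelsB.contains x = true
    · have hxm : x ∈ pvVowelsB := by simpa using hx
      rw [if_pos hx]
      by_cases hcl : c ∈ l ∧ c ∉ pvVowelsB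
      · rw [if_pos hcl, if_pos ⟨List.mem_cons_of_mem _ hcl.1, hcl.2⟩]
      · have hno : ¬(c ∈ x :: l ∧ c ∉ pvVowelsB) := by
          rintro ⟨hm, hnv⟩
          rcases List.mem_cons.mp hm with rfl | hm
          · exact hnv hxm
          · exact hcl ⟨hm, hnv⟩
        rw [if_neg hcl, if_neg hno]
    · have hxm : x ∉ pvVowelsB := by simpa using hx
      rw [if_neg hx]
      by_cases hcx : c = x
      · subst hcx
        have hm : c ∈ c :: l := List.mem_cons_self
        by_cases hcl : c ∈ l ∧ c ∉ pvVowelsB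
        · simp [hcl, hm]
        · simp [hm, hxm, PySem.Dict.get?_insert_self]
      · have hiff : (c ∈ x :: l ∧ c ∉ pvVowelsB) ↔ (c ∈ l ∧ c ∉ pvVowelsB) := by
          simp [List.mem_cons, hcx]
        rw [PySem.Dict.get?_insert_of_ne _ _ hcx]; simp only [hiff]

theorem pvTblGetD (l : List Char) (c : Char) (hc : c ∈ l) :
    PySem.Dict.getD
      (l.foldl (fun d c => if pvVowelsB.contains c then d
                           else PySem.Dict.insert d c [c, 'o', c]) PySem.Dict.empty) c [c]
    = pvExpand c := by
  simp only [PySem.Dict.getD, pvTblGet]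
  by_cases hv : c ∈ pvVowelsB
  · simp [hv, pvExpand, PySem.Dict.get?, PySem.Dict.empty]
  · simp [hv, hc, pvExpand]

-- ===== VERDICT (by name: the statement is the Claim_ definition above) =====
theorem rovarsprak_spec : Claim_equal_rovarsprak := by
  intro s _
  unfold Spec_rovarsprak rovarsprak rovarsprak_alt
  simp only []
  rw [show (['a','o','u','å','e','i','y','ä','ö','A','O','U','Å','E','I','Y','Ä','Ö'] : List Char)
        = pvVowelsB from rfl]
  rw [pvFoldA]
  congr 1
  rw [List.nil_append, List.flatMap_def]
  exact (List.map_congr_left (fun c hc => (pvTblGetD s.toList c hc).symm)).symm ▸ rfl
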